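-- pv_equiv track=rewrite | github.com/Ramyadeepthid/ImageDetection_IIITH_Group36 | backend.py | categorize_gaps
-- ===== SOURCE A (Python) =====
-- def overlaps(box1, box2):
--     """
--     Returns True if two boxes overlap (any intersection).
--     """
--     return not (
--         box1[2] <= box2[0] or
--         box1[0] >= box2[2] or
--         box1[3] <= box2[1] or
--         box1[1] >= box2[3]
--     )
--
-- def categorize_gaps(empty_shelf_gaps, all_bboxes_list):
--     """
--     Categorizes gaps into invalid (overlapping) and valid (true empty).
--     Any overlap with an object invalidates the gap.
--     """
--     overlapping_gaps = []
--     non_overlapping_gaps = []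
--
--     for gap in empty_shelf_gaps:
--         if any(overlaps(gap, obj) for obj in all_bboxes_list):
--             overlapping_gaps.append(gap)
--         else:
--             non_overlapping_gaps.append(gap)
--
--     return overlapping_gaps, non_overlapping_gaps
-- ===== SOURCE B (Python) =====
-- def categorize_gaps(empty_shelf_gaps, all_bboxes_list):
--     # Box-major pass: each object box marks the gaps it overlaps in a hit table,
--     # then the gaps are split once by that table.
--     hit = [False] * len(empty_shelf_gaps)
--     for obj in all_bboxes_list:
--         ox1, oy1, ox2, oy2 = obj[0], obj[1], obj[2], obj[3]
--         for i, gap in enumerate(empty_shelf_gaps):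
--             if not hit[i] and gap[0] < ox2 and ox1 < gap[2] and gap[1] < oy2 and oy1 < gap[3]:
--                 hit[i] = True
--     overlapping_gaps = [g for g, h in zip(empty_shelf_gaps, hit) if h]
--     non_overlapping_gaps = [g for g, h in zip(empty_shelf_gaps, hit) if not h]
--     return overlapping_gaps, non_overlapping_gaps
-- ===== Notes on version B (the rewrite author's own statement) =====
-- stated objective: alternative
-- what changed: B swaps the loop nesting: instead of scanning all boxes for each gap, it makes one box-major pass that marks overlapped gaps in a boolean hit table and then splits the gap list once by that table.
-- outside the precondition, e.g. on categorize_gaps([[0, 0, 1, 1]], [[3]]): A returns ([], [[0, 0, 1, 1]]), B raises IndexError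
import Mathlib
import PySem

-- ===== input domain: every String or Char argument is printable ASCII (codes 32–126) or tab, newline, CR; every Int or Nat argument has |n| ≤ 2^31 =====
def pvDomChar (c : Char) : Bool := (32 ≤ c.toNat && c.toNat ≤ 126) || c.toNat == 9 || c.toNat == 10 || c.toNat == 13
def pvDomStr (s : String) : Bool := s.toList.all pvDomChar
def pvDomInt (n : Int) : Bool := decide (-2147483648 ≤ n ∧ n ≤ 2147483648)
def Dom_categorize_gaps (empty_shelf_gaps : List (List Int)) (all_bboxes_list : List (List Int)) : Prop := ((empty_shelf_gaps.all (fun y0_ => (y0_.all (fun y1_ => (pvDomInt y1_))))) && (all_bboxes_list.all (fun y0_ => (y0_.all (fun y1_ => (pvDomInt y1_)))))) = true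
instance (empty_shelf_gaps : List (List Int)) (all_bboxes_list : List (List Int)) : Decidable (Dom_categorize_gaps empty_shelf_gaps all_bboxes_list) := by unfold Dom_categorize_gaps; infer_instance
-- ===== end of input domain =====

-- B replaces the gap-major scan over all boxes by a box-major pass that marks overlapped
-- gaps in a boolean hit table and then splits the gap list once (alternative structure, same cost).


-- ===== PORT A =====
-- overlaps(box1, box2); indices are exact inside Pre_ (all boxes have length ≥ 4)
def pvOverlaps (box1 box2 : List Int) : Bool :=
  !(decide (PySem.List.pyGetD box1 2 0 ≤ PySem.List.pyGetD box2 0 0) ||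
    decide (PySem.List.pyGetD box1 0 0 ≥ PySem.List.pyGetD box2 2 0) ||
    decide (PySem.List.pyGetD box1 3 0 ≤ PySem.List.pyGetD box2 1 0) ||
    decide (PySem.List.pyGetD box1 1 0 ≥ PySem.List.pyGetD box2 3 0))

def categorize_gaps (empty_shelf_gaps : List (List Int)) (all_bboxes_list : List (List Int)) : List (List Int) × List (List Int) :=
  empty_shelf_gaps.foldl
    (fun acc gap =>
      if all_bboxes_list.any (fun obj => pvOverlaps gap obj) then (acc.1 ++ [gap], acc.2)
      else (acc.1, acc.2 ++ [gap]))
    ([], [])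

-- ===== PORT B =====
-- the inner-loop test of Source B (strict interval overlap, gap-then-object order)
def pvHit (gap obj : List Int) : Bool :=
  decide (PySem.List.pyGetD gap 0 0 < PySem.List.pyGetD obj 2 0) &&
  decide (PySem.List.pyGetD obj 0 0 < PySem.List.pyGetD gap 2 0) &&
  decide (PySem.List.pyGetD gap 1 0 < PySem.List.pyGetD obj 3 0) &&
  decide (PySem.List.pyGetD obj 1 0 < PySem.List.pyGetD gap 3 0)

-- one box-major step: update the hit table for one object box
def pvMarkRow (gaps : List (List Int)) (hit : List Bool) (obj : List Int) : List Bool :=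
  (hit.zip gaps).map (fun hg => hg.1 || pvHit hg.2 obj)

def categorize_gaps_alt (empty_shelf_gaps : List (List Int)) (all_bboxes_list : List (List Int)) : List (List Int) × List (List Int) :=
  let hit := all_bboxes_list.foldl (pvMarkRow empty_shelf_gaps) (List.replicate empty_shelf_gaps.length false)
  ((empty_shelf_gaps.zip hit).filterMap (fun gh => if gh.2 then some gh.1 else none),
   (empty_shelf_gaps.zip hit).filterMap (fun gh => if gh.2 then none else some gh.1))

-- ===== PRECONDITION & SPEC =====
-- Pre_ excludes malformed boxes (inner lists shorter than 4, unless there are no object boxes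
-- at all), on which the Pythons raise IndexError except for accidental short-circuit cases.
def Pre_categorize_gaps (empty_shelf_gaps : List (List Int)) (all_bboxes_list : List (List Int)) : Prop :=
  all_bboxes_list = [] ∨
  ((∀ g ∈ empty_shelf_gaps, 4 ≤ g.length) ∧ (∀ b ∈ all_bboxes_list, 4 ≤ b.length))
instance (empty_shelf_gaps : List (List Int)) (all_bboxes_list : List (List Int)) : Decidable (Pre_categorize_gaps empty_shelf_gaps all_bboxes_list) := by unfold Pre_categorize_gaps; infer_instance

def pvWitness_categorize_gaps : List (List Int) × List (List Int) :=
  ([[0, 0, 2, 2], [10, 10, 12, 12]], [[1, 1, 3, 3]])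

def Spec_categorize_gaps (empty_shelf_gaps : List (List Int)) (all_bboxes_list : List (List Int)) (out : List (List Int) × List (List Int)) : Prop := out = categorize_gaps_alt empty_shelf_gaps all_bboxes_list
instance (empty_shelf_gaps : List (List Int)) (all_bboxes_list : List (List Int)) (out : List (List Int) × List (List Int)) : Decidable (Spec_categorize_gaps empty_shelf_gaps all_bboxes_list out) := by unfold Spec_categorize_gaps; infer_instance

-- ===== CLAIM (what is proved, stated in full; the proofs are below) =====
def Claim_equal_categorize_gaps : Prop := ∀ (empty_shelf_gaps : List (List Int)) (all_bboxes_list : List (List Int)), Dom_categorize_gaps empty_shelf_gaps all_bboxes_list → Pre_categorize_gaps empty_shelf_gaps all_bboxes_list → Spec_categorize_gaps empty_shelf_gaps all_bboxes_list (categorize_gaps empty_shelf_gaps all_bboxes_list)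

-- ===== LEMMAS AND PROOFS =====

-- the two overlap tests agree pointwise (a pure Bool/arith identity, no length assumption needed)
theorem pvHit_eq_pvOverlaps (g o : List Int) : pvHit g o = pvOverlaps g o := by
  unfold pvHit pvOverlaps
  simp only [← decide_not, ← Bool.decide_and, ← Bool.decide_or]
  exact decide_eq_decide.mpr (by omega)

-- A's fold accumulates exactly the two filters
theorem foldA_eq (boxes : List (List Int)) (gaps : List (List Int)) (acc : List (List Int) × List (List Int)) :
    gaps.foldl
      (fun acc gap =>
        if boxes.any (fun obj => pvOverlaps gap obj) then (acc.1 ++ [gap], acc.2)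
        else (acc.1, acc.2 ++ [gap])) acc
    = (acc.1 ++ gaps.filter (fun g => boxes.any (fun o => pvOverlaps g o)),
       acc.2 ++ gaps.filter (fun g => !(boxes.any (fun o => pvOverlaps g o)))) := by
  induction gaps generalizing acc with
  | nil => simp
  | cons g gs ih =>
    rw [List.foldl_cons]
    by_cases h : (boxes.any fun o => pvOverlaps g o) = true
    · rw [if_pos h, ih]; simp [h]
    · rw [if_neg h, ih]; simp [h]

-- one pvMarkRow step on a table of the form gaps.map f
theorem markRow_map (gaps : List (List Int)) (f : List Int → Bool) (obj : List Int) :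
    pvMarkRow gaps (gaps.map f) obj = gaps.map (fun g => f g || pvHit g obj) := by
  unfold pvMarkRow
  induction gaps with
  | nil => simp
  | cons g gs ih => simp_all

-- the whole box-major fold computes, per gap, the existence test
theorem hits_eq (gaps : List (List Int)) (boxes : List (List Int)) (f : List Int → Bool) :
    boxes.foldl (pvMarkRow gaps) (gaps.map f)
      = gaps.map (fun g => f g || boxes.any (fun o => pvHit g o)) := by
  induction boxes generalizing f with
  | nil => simp
  | cons o os ih =>
    simp only [List.foldl_cons, markRow_map, ih, List.any_cons, Bool.or_assoc]

theorem zip_map_filterMap_pos (gaps : List (List Int)) (p : List Int → Bool) :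
    (gaps.zip (gaps.map p)).filterMap (fun gh => if gh.2 then some gh.1 else none)
      = gaps.filter p := by
  induction gaps with
  | nil => simp
  | cons g gs ih =>
    by_cases h : p g = true <;> simp [h, ih]

theorem zip_map_filterMap_neg (gaps : List (List Int)) (p : List Int → Bool) :
    (gaps.zip (gaps.map p)).filterMap (fun gh => if gh.2 then none else some gh.1)
      = gaps.filter (fun g => !(p g)) := by
  induction gaps with
  | nil => simp
  | cons g gs ih =>
    by_cases h : p g = true <;> simp [h, ih]

theorem alt_eq_filters (gaps boxes : List (List Int)) :
    categorize_gaps_alt gaps boxes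
      = (gaps.filter (fun g => boxes.any (fun o => pvHit g o)),
         gaps.filter (fun g => !(boxes.any (fun o => pvHit g o)))) := by
  unfold categorize_gaps_alt
  have hrep : (List.replicate gaps.length false) = gaps.map (fun _ => false) := by
    simp
  rw [hrep, hits_eq gaps boxes (fun _ => false)]
  simp only [Bool.false_or]
  rw [zip_map_filterMap_pos, zip_map_filterMap_neg]

-- ===== VERDICT (by name: the statement is the Claim_ definition above) =====
theorem categorize_gaps_spec : Claim_equal_categorize_gaps := by
  intro gaps boxes _ _
  unfold Spec_categorize_gaps
  unfold categorize_gaps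
  rw [foldA_eq, alt_eq_filters]
  simp [pvHit_eq_pvOverlaps]
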